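-- pv_equiv track=rewrite | github.com/rdmagm062699/project_euler_python_kata | src/problem_40/solution/irrational_decimal.py | get_fraction_digits
-- ===== SOURCE A (Python) =====
-- def get_fraction_digits(length):
--     digits = '0123456789'
--
--     if length < 10:
--         return digits[1:length + 1]
--     else:
--         value = '123456789'
--         nextStart = 1
--         while len(value) < length:
--             nextChunk = ''.join([str(nextStart) + digit for digit in digits])
--             value += nextChunk
--             nextStart += 1
--
--         return value[0:length]
-- ===== SOURCE B (Python) =====
-- def get_fraction_digits(length):
--     # Find the digit-block containing position `length`:
--     # numbers with d digits occupy d*9*10^(d-1) positions starting after `total`.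
--     total, d, count, start = 0, 1, 9, 1
--     while total + d * count < length:
--         total += d * count
--         d += 1
--         count *= 10
--         start *= 10
--     # last concatenated number needed to reach `length` characters
--     last = start + (length - total + d - 1) // d - 1
--     return ''.join(str(n) for n in range(1, last + 1))[:length]
-- ===== Notes on version B (the rewrite author's own statement) =====
-- stated objective: faster
-- what changed: A grows one string decade-chunk by decade-chunk, repeatedly appending to an ever longer string until it is long enough; B first computes by closed-form digit-block arithmetic (counting how many characters the numbers of each digit-length contribute) exactly which number the requested prefix ends in, then builds the string once with a single join and slices it.
-- intended difference: For length in [-9,-2] A returns a nonempty digit string (an artefact of the negative slice digits[1:length+1], e.g. '12345678' for length=-2) while B returns '', the intended answer when no digits are requested. — e.g. on get_fraction_digits(-2): A returns "12345678", B returns ""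
import Mathlib
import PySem

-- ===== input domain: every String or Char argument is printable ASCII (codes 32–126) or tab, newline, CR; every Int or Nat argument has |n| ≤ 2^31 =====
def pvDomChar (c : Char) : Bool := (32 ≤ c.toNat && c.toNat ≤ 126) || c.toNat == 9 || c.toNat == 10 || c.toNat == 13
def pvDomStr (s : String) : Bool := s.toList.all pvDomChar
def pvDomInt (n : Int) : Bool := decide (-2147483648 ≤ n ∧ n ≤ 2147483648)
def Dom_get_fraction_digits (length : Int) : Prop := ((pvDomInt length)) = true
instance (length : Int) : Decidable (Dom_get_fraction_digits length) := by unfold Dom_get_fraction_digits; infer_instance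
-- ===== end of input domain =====

-- B replaces A's grow-a-string-by-decade-chunks loop by closed-form digit-block arithmetic that
-- computes in advance which numbers are needed, then builds the string once with a single join
-- (objective: faster — it avoids A's repeated concatenation onto an ever longer string).

-- ===== PORT A =====
-- ''.join([str(nextStart) + digit for digit in digits])
def pvChunkA (s : Int) : List Char :=
  PySem.Chars.join [] (("0123456789".toList).map (fun d => PySem.Int.toChars s ++ [d]))

-- the while loop of A; fuel length.toNat is enough: each iteration appends ≥ 10 characters
def pvLoopA (len : Int) (fuel : Nat) (value : List Char) (s : Int) : List Char :=
  match fuel with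
  | 0 => value
  | f + 1 =>
    if (value.length : Int) < len then pvLoopA len f (value ++ pvChunkA s) (s + 1)
    else value

def get_fraction_digits (length : Int) : String :=
  if length < 10 then
    PySem.Str.slice "0123456789" (some 1) (some (length + 1))
  else
    PySem.Str.slice (String.ofList (pvLoopA length length.toNat ("123456789".toList) 1))
      (some 0) (some length)

-- ===== PORT B =====
-- the while loop of B; fuel length.toNat is enough: each iteration adds d*count ≥ 9 to total
def pvBlockB (len : Int) (fuel : Nat) (total d count start : Int) : Int × Int × Int :=
  match fuel with
  | 0 => (total, d, start)
  | f + 1 =>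
    if total + d * count < len then pvBlockB len f (total + d * count) (d + 1) (count * 10) (start * 10)
    else (total, d, start)

def get_fraction_digits_alt (length : Int) : String :=
  match pvBlockB length length.toNat 0 1 9 1 with
  | (total, d, start) =>
    let last := start + PySem.Int.floordiv (length - total + d - 1) d - 1
    PySem.Str.slice
      (PySem.Str.join "" ((PySem.List.pyRange 1 (last + 1) 1).map PySem.Int.toStr))
      none (some length)

-- ===== PRECONDITION & SPEC =====
-- For length in [-9,-2] A returns a nonempty digit string (an artefact of the negative slice
-- digits[1:length+1], e.g. '12345678' for length = -2) while B returns '', the intended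
-- "no digits requested" answer for a non-positive length.
def D_get_fraction_digits (length : Int) : Prop := -9 ≤ length ∧ length ≤ -2
instance (length : Int) : Decidable (D_get_fraction_digits length) := by unfold D_get_fraction_digits; infer_instance

def Spec_get_fraction_digits (length : Int) (out : String) : Prop :=
  ¬ D_get_fraction_digits length → out = get_fraction_digits_alt length
instance (length : Int) (out : String) : Decidable (Spec_get_fraction_digits length out) := by unfold Spec_get_fraction_digits; infer_instance

def pvDiffWitness_get_fraction_digits : Int := (-2)
def pvDiffWitnessOut_get_fraction_digits : String × String := ("12345678", "")

-- ===== CLAIM (what is proved, stated in full; the proofs are below) =====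
def Claim_unchanged_get_fraction_digits : Prop := ∀ (length : Int), Dom_get_fraction_digits length → Spec_get_fraction_digits length (get_fraction_digits length)
def Claim_changed_get_fraction_digits : Prop := Dom_get_fraction_digits (pvDiffWitness_get_fraction_digits) ∧ D_get_fraction_digits (pvDiffWitness_get_fraction_digits) ∧ get_fraction_digits (pvDiffWitness_get_fraction_digits) = pvDiffWitnessOut_get_fraction_digits.1 ∧ get_fraction_digits_alt (pvDiffWitness_get_fraction_digits) = pvDiffWitnessOut_get_fraction_digits.2 ∧ pvDiffWitnessOut_get_fraction_digits.1 ≠ pvDiffWitnessOut_get_fraction_digits.2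
def Claim_exact_get_fraction_digits : Prop := ∀ (length : Int), Dom_get_fraction_digits length → D_get_fraction_digits length → get_fraction_digits length ≠ get_fraction_digits_alt length

-- ===== LEMMAS AND PROOFS =====

-- join with an empty separator is concatenation
theorem pvJoin_empty_sep (xss : List (List Char)) : PySem.Chars.join [] xss = xss.flatten := by
  induction xss with
  | nil => simp [PySem.Chars.join, List.intercalate]
  | cons x xs ih =>
    cases xs with
    | nil => simp [PySem.Chars.join, List.intercalate]
    | cons y ys => rw [PySem.Chars.join_cons_cons]; simp [ih, List.flatten]

-- the decimal digits of n (most significant first), as Python's str produces for n ≥ 0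
def pvDig (n : Nat) : List Char :=
  if n < 10 then [Nat.digitChar n]
  else pvDig (n / 10) ++ [Nat.digitChar (n % 10)]
  termination_by n
  decreasing_by exact Nat.div_lt_self (by omega) (by omega)

theorem pvDig_small {n : Nat} (h : n < 10) : pvDig n = [Nat.digitChar n] := by
  rw [pvDig]; simp [h]

theorem pvDig_step {n : Nat} (h : 10 ≤ n) :
    pvDig n = pvDig (n / 10) ++ [Nat.digitChar (n % 10)] := by
  rw [pvDig]; simp [Nat.not_lt.mpr h]

theorem pvToDigitsCore_eq : ∀ (f n : Nat) (ds : List Char), n < f →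
    Nat.toDigitsCore 10 f n ds = pvDig n ++ ds := by
  intro f
  induction f with
  | zero => omega
  | succ f ih =>
    intro n ds hn
    by_cases h : n / 10 = 0
    · have h10 : n < 10 := by omega
      simp [Nat.toDigitsCore, h, pvDig_small h10, Nat.mod_eq_of_lt h10]
    · have h10 : 10 ≤ n := by omega
      have : Nat.toDigitsCore 10 (f + 1) n ds =
          Nat.toDigitsCore 10 f (n / 10) ((n % 10).digitChar :: ds) := by
        simp [Nat.toDigitsCore, h]
      rw [this, ih (n / 10) _ (by omega), pvDig_step h10]
      simp

theorem pvToChars_eq (n : Int) (h : 0 ≤ n) : PySem.Int.toChars n = pvDig n.toNat := by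
  have : ¬ n < 0 := by omega
  simp [PySem.Int.toChars, this, Nat.toDigits, pvToDigitsCore_eq (n.toNat + 1) n.toNat [] (by omega)]

theorem pvDig_ne_nil (n : Nat) : pvDig n ≠ [] := by
  by_cases h : n < 10
  · simp [pvDig_small h]
  · rw [pvDig_step (by omega)]; simp

theorem pvDig_append {a b : Nat} (ha : 1 ≤ a) (hb : b < 10) :
    pvDig (10 * a + b) = pvDig a ++ [Nat.digitChar b] := by
  have h10 : 10 ≤ 10 * a + b := by omega
  rw [pvDig_step h10]
  have h1 : (10 * a + b) / 10 = a := by omega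
  have h2 : (10 * a + b) % 10 = b := by omega
  rw [h1, h2]

theorem pvDig_length : ∀ (k n : Nat), 10 ^ k ≤ n → n < 10 ^ (k + 1) →
    (pvDig n).length = k + 1 := by
  intro k
  induction k with
  | zero => intro n h1 h2; simp at h1 h2; simp [pvDig_small h2]
  | succ k ih =>
    intro n h1 h2
    have h10 : 10 ≤ n := by
      have : (10:Nat) ≤ 10 ^ (k+1) := by
        calc (10:Nat) = 10 ^ 1 := by norm_num
        _ ≤ 10 ^ (k+1) := Nat.pow_le_pow_right (by norm_num) (by omega)
      omega
    have hd1 : 10 ^ k ≤ n / 10 := by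
      have := Nat.div_le_div_right (c := 10) h1
      simpa [Nat.pow_succ, Nat.mul_div_cancel] using Nat.le_div_iff_mul_le (by norm_num) |>.mpr (by
        calc 10 ^ k * 10 = 10 ^ (k+1) := by ring
        _ ≤ n := h1)
    have hd2 : n / 10 < 10 ^ (k + 1) := by
      rw [Nat.div_lt_iff_lt_mul (by norm_num)]
      calc n < 10 ^ (k + 2) := h2
      _ = 10 ^ (k+1) * 10 := by ring
    rw [pvDig_step h10]
    simp [ih (n / 10) hd1 hd2]

theorem pvDig_one_le_length (n : Nat) : 1 ≤ (pvDig n).length := by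
  have := pvDig_ne_nil n
  cases hc : pvDig n with
  | nil => exact absurd hc this
  | cons a l => simp

-- the first N numbers of Champernowne's word, concatenated
def pvChamp (N : Nat) : List Char := (List.range' 1 N).flatMap pvDig

theorem pvChamp_succ (N : Nat) : pvChamp (N + 1) = pvChamp N ++ pvDig (N + 1) := by
  unfold pvChamp
  rw [List.range'_concat]
  simp [Nat.add_comm]

theorem pvChamp_add (N M : Nat) :
    pvChamp (N + M) = pvChamp N ++ (List.range' (N + 1) M).flatMap pvDig := by
  unfold pvChamp
  rw [← List.range'_append (s := 1) (m := N) (n := M) (step := 1)]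
  simp [List.flatMap_append, Nat.add_comm]

theorem pvChamp_prefix_take {N M : Nat} {L : Nat} (hNM : N ≤ M)
    (hL : L ≤ (pvChamp N).length) : (pvChamp M).take L = (pvChamp N).take L := by
  have : M = N + (M - N) := by omega
  rw [this, pvChamp_add]
  exact List.take_append_of_le_length hL

theorem pvChunkA_eq (k : Nat) (hk : 1 ≤ k) :
    pvChunkA (k : Int) = (List.range' (10 * k) 10).flatMap pvDig := by
  have hc : PySem.Int.toChars (k : Int) = pvDig k := by
    rw [pvToChars_eq _ (by positivity)]; simp
  have hd : ∀ j : Nat, j < 10 → pvDig (10 * k + j) = pvDig k ++ [Nat.digitChar j] :=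
    fun j hj => pvDig_append hk hj
  rw [pvChunkA, pvJoin_empty_sep]
  have hr : List.range' (10 * k) 10 =
      [10*k+0, 10*k+1, 10*k+2, 10*k+3, 10*k+4, 10*k+5, 10*k+6, 10*k+7, 10*k+8, 10*k+9] := by
    simp [List.range']
  rw [hr]
  simp only [List.flatMap_cons, List.flatMap_nil, List.append_nil,
    hd 0 (by omega), hd 1 (by omega), hd 2 (by omega), hd 3 (by omega), hd 4 (by omega),
    hd 5 (by omega), hd 6 (by omega), hd 7 (by omega), hd 8 (by omega), hd 9 (by omega)]
  simp [hc, Nat.digitChar]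

-- the length of a list of digit strings is at least the number of strings
theorem pvFlatMap_dig_len (l : List Nat) : l.length ≤ (l.flatMap pvDig).length := by
  induction l with
  | nil => simp
  | cons a l ih => simp only [List.flatMap_cons, List.length_append, List.length_cons]
                   have := pvDig_one_le_length a; omega

-- chunk length is at least 10
theorem pvChunkA_len (k : Nat) (hk : 1 ≤ k) : 10 ≤ (pvChunkA (k : Int)).length := by
  rw [pvChunkA_eq k hk]
  have := pvFlatMap_dig_len (List.range' (10 * k) 10)
  simpa using this

theorem pvLoopA_champ : ∀ (fuel : Nat) (k : Nat) (len : Int), 1 ≤ k →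
    len ≤ ((pvChamp (10 * k - 1)).length : Int) + 10 * fuel →
    ∃ N : Nat, pvLoopA len fuel (pvChamp (10 * k - 1)) (k : Int) = pvChamp N ∧
      len ≤ ((pvChamp N).length : Int) := by
  intro fuel
  induction fuel with
  | zero =>
    intro k len hk hb
    exact ⟨10 * k - 1, rfl, by simpa using hb⟩
  | succ f ih =>
    intro k len hk hb
    rw [pvLoopA]
    by_cases hlt : ((pvChamp (10 * k - 1)).length : Int) < len
    · rw [if_pos hlt]
      have hval : pvChamp (10 * k - 1) ++ pvChunkA (k : Int) = pvChamp (10 * (k + 1) - 1) := by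
        rw [pvChunkA_eq k hk]
        have h1 : 10 * (k + 1) - 1 = (10 * k - 1) + 10 := by omega
        rw [h1, pvChamp_add]
        have h2 : (10 * k - 1) + 1 = 10 * k := by omega
        rw [h2]
      have hcast : (k : Int) + 1 = ((k + 1 : Nat) : Int) := by push_cast; ring
      rw [hval, hcast]
      apply ih (k + 1) len (by omega)
      have hlen : (pvChamp (10 * k - 1)).length + 10 ≤ (pvChamp (10 * (k + 1) - 1)).length := by
        rw [← hval]
        have := pvChunkA_len k hk
        simp only [List.length_append]; omega
      push_cast at hb hlen ⊢
      omega
    · rw [if_neg hlt]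
      exact ⟨10 * k - 1, rfl, by omega⟩

-- length of a block of m consecutive E-digit numbers appended after 10^(E-1)-1
theorem pvChamp_block_len (E : Nat) (hE : 1 ≤ E) :
    ∀ m : Nat, m ≤ 9 * 10 ^ (E - 1) →
    (pvChamp (10 ^ (E - 1) - 1 + m)).length = (pvChamp (10 ^ (E - 1) - 1)).length + m * E := by
  intro m
  induction m with
  | zero => simp
  | succ m ih =>
    intro hm
    have hpow : 1 ≤ 10 ^ (E - 1) := Nat.one_le_pow _ _ (by omega)
    have h1 : 10 ^ (E - 1) - 1 + (m + 1) = (10 ^ (E - 1) - 1 + m) + 1 := by omega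
    rw [h1, pvChamp_succ]
    have h2 : (10 ^ (E - 1) - 1 + m) + 1 = 10 ^ (E - 1) + m := by omega
    have hdl : (pvDig ((10 ^ (E - 1) - 1 + m) + 1)).length = E := by
      rw [h2]
      have hE1 : (E - 1) + 1 = E := by omega
      have hub : 10 ^ (E - 1) + m < 10 ^ ((E - 1) + 1) := by
        have : 10 ^ ((E - 1) + 1) = 10 * 10 ^ (E - 1) := by ring
        omega
      have := pvDig_length (E - 1) (10 ^ (E - 1) + m) (by omega) hub
      omega
    rw [List.length_append, hdl, ih (by omega)]
    ring

theorem pvBlockB_inv : ∀ (fuel : Nat) (len t d c st : Int) (E : Nat), 1 ≤ E →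
    d = (E : Int) → st = ((10 ^ (E - 1) : Nat) : Int) → c = ((9 * 10 ^ (E - 1) : Nat) : Int) →
    t = ((pvChamp (10 ^ (E - 1) - 1)).length : Int) → t < len →
    len ≤ t + 9 * fuel + 9 →
    ∃ F : Nat, 1 ≤ F ∧
      pvBlockB len fuel t d c st =
        (((pvChamp (10 ^ (F - 1) - 1)).length : Int), (F : Int), ((10 ^ (F - 1) : Nat) : Int)) ∧
      ((pvChamp (10 ^ (F - 1) - 1)).length : Int) < len ∧
      len ≤ ((pvChamp (10 ^ (F - 1) - 1)).length : Int) + (F : Int) * ((9 * 10 ^ (F - 1) : Nat) : Int) := by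
  intro fuel
  induction fuel with
  | zero =>
    intro len t d c st E hE hd hst hc ht htlen hb
    refine ⟨E, hE, by simp [pvBlockB, ht, hd, hst], by omega, ?_⟩
    have h9 : (9 : Int) ≤ (E : Int) * ((9 * 10 ^ (E - 1) : Nat) : Int) := by
      have hp : 1 ≤ 10 ^ (E - 1) := Nat.one_le_pow _ _ (by omega)
      have : (9 : Nat) ≤ E * (9 * 10 ^ (E - 1)) := by nlinarith
      exact_mod_cast this
    omega
  | succ f ih =>
    intro len t d c st E hE hd hst hc ht htlen hb
    rw [pvBlockB]
    have hp : 1 ≤ 10 ^ (E - 1) := Nat.one_le_pow _ _ (by omega)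
    have hdc : d * c = (E : Int) * ((9 * 10 ^ (E - 1) : Nat) : Int) := by rw [hd, hc]
    have h9 : (9 : Int) ≤ d * c := by
      rw [hdc]
      have : (9 : Nat) ≤ E * (9 * 10 ^ (E - 1)) := by nlinarith
      exact_mod_cast this
    by_cases hg : t + d * c < len
    · rw [if_pos hg]
      have hE1 : (E + 1) - 1 = E := by omega
      have hEpow : 10 ^ ((E + 1) - 1) = 10 * 10 ^ (E - 1) := by
        rw [hE1]
        conv_lhs => rw [show E = (E - 1) + 1 by omega]
        rw [pow_succ]; ring
      have ht' : t + d * c = ((pvChamp (10 ^ ((E + 1) - 1) - 1)).length : Int) := by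
        have hblk := pvChamp_block_len E hE (9 * 10 ^ (E - 1)) (le_refl _)
        have hidx : 10 ^ (E - 1) - 1 + 9 * 10 ^ (E - 1) = 10 ^ ((E + 1) - 1) - 1 := by
          rw [hEpow]; omega
        rw [hidx] at hblk
        rw [ht, hdc, hblk]
        push_cast
        ring
      obtain ⟨F, hF, heq, hlt, hle⟩ := ih len (t + d * c) (d + 1) (c * 10) (st * 10) (E + 1)
        (by omega)
        (by rw [hd]; push_cast; ring)
        (by rw [hst, hEpow]; push_cast; ring)
        (by rw [hc, hE1]
            have h10 : 9 * 10 ^ E = (9 * 10 ^ (E - 1)) * 10 := by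
              conv_lhs => rw [show E = (E - 1) + 1 by omega]
              rw [pow_succ]; ring
            rw [h10]; push_cast; ring)
        ht' hg (by omega)
      exact ⟨F, hF, heq, hlt, hle⟩
    · rw [if_neg hg]
      exact ⟨E, hE, by rw [ht, hd, hst], by omega, by rw [← hdc]; omega⟩

-- range(1, N+1) is the list of the first N positive integers
theorem pvPyRange_eq (N : Nat) :
    PySem.List.pyRange 1 ((N : Int) + 1) 1 = (List.range' 1 N).map (fun n : Nat => (n : Int)) := by
  rw [PySem.List.pyRange_one]
  have h1 : (((N : Int) + 1) - 1).toNat = N := by omega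
  rw [h1, List.range'_eq_map_range, List.map_map]
  apply List.map_congr_left
  intro k _
  simp

-- the string B joins is the Champernowne word over the listed numbers
theorem pvJoinStr (L : List Nat) :
    (PySem.Str.join "" (List.map (PySem.Int.toStr ∘ fun n : Nat => (n : Int)) L)).toList
      = L.flatMap pvDig := by
  rw [PySem.Str.toList_join, List.map_map,
    show ("" : String).toList = ([] : List Char) from rfl, pvJoin_empty_sep]
  induction L with
  | nil => simp
  | cons a l ih =>
    simp only [List.map_cons, List.flatten_cons, List.flatMap_cons, ih]
    congr 1
    simp [Function.comp_def, PySem.Int.toList_toStr, pvToChars_eq _ (Int.natCast_nonneg a)]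

-- the string built by B is a Champernowne prefix of sufficient length
theorem pvB_champ (length : Int) (h : 10 ≤ length) :
    ∃ M : Nat, (get_fraction_digits_alt length).toList = (pvChamp M).take length.toNat ∧
      length ≤ ((pvChamp M).length : Int) := by
  obtain ⟨F, hF, hblock, hlt, hle⟩ := pvBlockB_inv length.toNat length 0 1 9 1 1
    (le_refl 1) (by norm_num) (by norm_num) (by norm_num)
    (by norm_num [pvChamp]) (by omega) (by omega)
  have hFpos : (0 : Int) < (F : Int) := by exact_mod_cast hF
  unfold get_fraction_digits_alt
  rw [hblock]
  dsimp only
  set T : Int := ((pvChamp (10 ^ (F - 1) - 1)).length : Int) with hT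
  set R : Int := length - T with hR
  set q : Int := PySem.Int.floordiv (R + (F : Int) - 1) (F : Int) with hq
  obtain ⟨hq1, hq2⟩ := (PySem.Int.floordiv_eq_iff_of_pos hFpos).mp hq.symm
  have hR1 : 1 ≤ R := by omega
  have hqpos : 1 ≤ q := by nlinarith
  have hqF : R ≤ q * (F : Int) := by nlinarith
  have hqC : q ≤ ((9 * 10 ^ (F - 1) : Nat) : Int) := by
    set C : Int := ((9 * 10 ^ (F - 1) : Nat) : Int) with hC
    have hRC : R ≤ (F : Int) * C := by omega
    nlinarith
  set lastN : Nat := 10 ^ (F - 1) - 1 + q.toNat with hlastN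
  have hpow : 1 ≤ 10 ^ (F - 1) := Nat.one_le_pow _ _ (by omega)
  have hlast : ((10 ^ (F - 1) : Nat) : Int) + PySem.Int.floordiv (length - T + (F : Int) - 1) (F : Int) - 1 + 1
      = ((lastN : Nat) : Int) + 1 := by
    have hfd : PySem.Int.floordiv (length - T + (F : Int) - 1) (F : Int) = q := by
      rw [hq, hR]
    rw [hfd, hlastN]
    have hj : (1:Int) ≤ ((10 ^ (F - 1) : Nat) : Int) := by exact_mod_cast hpow
    push_cast [Int.toNat_of_nonneg (by omega : (0:Int) ≤ q), Nat.cast_sub hpow]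
    omega
  have hchlen : (pvChamp lastN).length = (pvChamp (10 ^ (F - 1) - 1)).length + q.toNat * F := by
    rw [hlastN]
    exact pvChamp_block_len F hF q.toNat (by omega)
  have hlen : length ≤ ((pvChamp lastN).length : Int) := by
    rw [hchlen]
    push_cast [Int.toNat_of_nonneg (by omega : (0:Int) ≤ q)]
    omega
  refine ⟨lastN, ?_, hlen⟩
  rw [hlast, pvPyRange_eq, PySem.Str.toList_slice, PySem.Chars.slice_eq_listSlice,
    PySem.List.slice_to _ (by omega : (0:Int) ≤ length), List.map_map, pvJoinStr]
  rfl

-- '123456789' is the Champernowne word over 1..9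
theorem pvChamp_nine : pvChamp 9 = ("123456789".toList) := by
  have hs : ∀ j : Nat, j < 10 → pvDig j = [Nat.digitChar j] := fun j hj => pvDig_small hj
  rw [pvChamp, show (9:Nat) = 8+1 from rfl, List.range'_concat]
  simp only [List.flatMap_append, List.flatMap_cons, List.flatMap_nil]
  rw [show List.range' 1 8 = [1,2,3,4,5,6,7,8] by simp [List.range']]
  simp only [List.flatMap_cons, List.flatMap_nil,
    hs 1 (by omega), hs 2 (by omega), hs 3 (by omega), hs 4 (by omega), hs 5 (by omega),
    hs 6 (by omega), hs 7 (by omega), hs 8 (by omega), hs (1+1*8) (by omega)]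
  decide

theorem pvA_champ (length : Int) (h : 10 ≤ length) :
    ∃ N : Nat, (get_fraction_digits length).toList = (pvChamp N).take length.toNat ∧
      length ≤ ((pvChamp N).length : Int) := by
  unfold get_fraction_digits
  rw [if_neg (by omega : ¬ length < 10)]
  obtain ⟨N, hN, hNl⟩ := pvLoopA_champ length.toNat 1 length (le_refl 1) (by
    have h9 : (pvChamp (10 * 1 - 1)).length = 9 := by rw [pvChamp_nine]; decide
    rw [h9]; omega)
  refine ⟨N, ?_, hNl⟩
  rw [PySem.Str.toList_slice, PySem.Chars.slice_eq_listSlice, PySem.List.slice_zero_start,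
    PySem.List.slice_to _ (by omega : (0:Int) ≤ length), String.toList_ofList]
  rw [show ("123456789".toList) = pvChamp (10 * 1 - 1) from pvChamp_nine.symm,
    show (1 : Int) = ((1 : Nat) : Int) from rfl, hN]

theorem pv_big (length : Int) (h : 10 ≤ length) :
    get_fraction_digits length = get_fraction_digits_alt length := by
  obtain ⟨N, hA, hAl⟩ := pvA_champ length h
  obtain ⟨M, hB, hBl⟩ := pvB_champ length h
  rw [← String.toList_inj, hA, hB]
  have hLN : length.toNat ≤ (pvChamp N).length := by omega
  have hLM : length.toNat ≤ (pvChamp M).length := by omega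
  rcases le_total N M with hNM | hMN
  · rw [pvChamp_prefix_take hNM hLN]
  · rw [pvChamp_prefix_take hMN hLM]

theorem pv_neg (length : Int) (h : length ≤ -10) :
    get_fraction_digits length = get_fraction_digits_alt length := by
  rw [← String.toList_inj]
  have hA : (get_fraction_digits length).toList = [] := by
    unfold get_fraction_digits
    rw [if_pos (by omega : length < 10), PySem.Str.toList_slice, PySem.Chars.slice_eq_listSlice]
    apply List.eq_nil_of_length_eq_zero
    rw [PySem.List.length_slice]
    simp only [PySem.List.clampIdx]
    split_ifs <;> simp_all <;> omega
  have hB : (get_fraction_digits_alt length).toList = [] := by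
    unfold get_fraction_digits_alt
    have hfuel : length.toNat = 0 := by omega
    rw [hfuel]
    dsimp only [pvBlockB]
    have hfd : PySem.Int.floordiv (length - 0 + 1 - 1) 1 = length := by
      rw [PySem.Int.floordiv_eq_iff_of_pos (by omega : (0:Int) < 1)]
      omega
    rw [hfd]
    rw [PySem.List.pyRange_one_eq_nil (by omega : 1 + length - 1 + 1 ≤ 1)]
    rw [PySem.Str.toList_slice, PySem.Chars.slice_eq_listSlice, PySem.Str.toList_join]
    simp [PySem.Chars.join_nil, PySem.List.slice]
  rw [hA, hB]

-- ===== VERDICT (by name: the statement is the Claim_ definition above) =====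
theorem get_fraction_digits_spec : Claim_unchanged_get_fraction_digits := by
  intro length _ hD
  by_cases h10 : 10 ≤ length
  · exact pv_big length h10
  · by_cases hneg : length ≤ -10
    · exact pv_neg length hneg
    · have h1 : -1 ≤ length := by
        unfold D_get_fraction_digits at hD
        by_contra hc
        exact hD ⟨by omega, by omega⟩
      have h2 : length ≤ 9 := by omega
      interval_cases length <;> decide

theorem get_fraction_digits_changed : Claim_changed_get_fraction_digits := by
  unfold Claim_changed_get_fraction_digits; decide

theorem get_fraction_digits_tight : Claim_exact_get_fraction_digits := by
  intro length _ hD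
  obtain ⟨h1, h2⟩ := hD
  interval_cases length <;> decide
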